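-- pv_equiv track=rewrite | github.com/ensomniac/dash | pydash/Dash/Utils/list.py | GetListPortion
-- ===== SOURCE A (Python) =====
-- def GetListPortion(list_obj, center_anchor_value, size=3):
--     if type(list_obj) is not list:
--         raise Exception("GetPortion only accepts lists")
--
--     if size >= len(list_obj):
--         return list_obj
--
--     from math import floor
--
--     index_dif = floor(size / 2)
--     center_anchor_index = list_obj.index(center_anchor_value)
--     start_index = center_anchor_index - index_dif
--     end_index = center_anchor_index + (index_dif + 1)
--
--     if start_index < 0:
--         start_index = 0
--
--     if end_index > len(list_obj):
--         end_index = len(list_obj)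
--
--     portion = list_obj[start_index:end_index]
--
--     for _ in range(0, size):
--         dif = size - len(portion)
--
--         if dif == 0:
--             break
--
--         target_index = portion.index(center_anchor_value)
--
--         if target_index < index_dif:
--             for _ in range(0, dif):
--                 if (start_index - 1) >= 0:
--                     start_index -= 1
--
--                 elif (end_index + 1) <= len(list_obj):
--                     end_index += 1
--         else:
--             for _ in range(0, dif):
--                 if (end_index + 1) <= len(list_obj):
--                     end_index += 1
--
--                 elif (start_index - 1) >= 0:
--                     start_index -= 1
--
--         portion = list_obj[start_index:end_index]
--
--     return portion
-- ===== SOURCE B (Python) =====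
-- def GetListPortion(list_obj, center_anchor_value, size=3):
--     if type(list_obj) is not list:
--         raise Exception("GetPortion only accepts lists")
--
--     n = len(list_obj)
--
--     if size >= n:
--         return list_obj
--
--     half = size // 2
--     center = list_obj.index(center_anchor_value)
--     start = max(0, center - half)
--     end = min(n, center + half + 1)
--
--     # Window shortfall only happens when exactly one edge was clipped:
--     # clipped at the left -> slide the window to [0, size),
--     # clipped at the right -> slide it to [n - size, n).
--     if end - start < size:
--         if start == 0:
--             end = size
--         else:
--             start = n - size
--
--     return list_obj[start:end]
-- ===== Notes on version B (the rewrite author's own statement) =====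
-- stated objective: simpler
-- what changed: Replaces A's iterative window-adjustment loop (repeatedly re-slicing, re-finding the center inside the portion and growing/shrinking one step at a time) with a direct computation of the clamped window followed by a single closed-form slide: if the window falls short it becomes [0,size) when clipped on the left and [n-size,n) when clipped on the right.
import Mathlib
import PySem

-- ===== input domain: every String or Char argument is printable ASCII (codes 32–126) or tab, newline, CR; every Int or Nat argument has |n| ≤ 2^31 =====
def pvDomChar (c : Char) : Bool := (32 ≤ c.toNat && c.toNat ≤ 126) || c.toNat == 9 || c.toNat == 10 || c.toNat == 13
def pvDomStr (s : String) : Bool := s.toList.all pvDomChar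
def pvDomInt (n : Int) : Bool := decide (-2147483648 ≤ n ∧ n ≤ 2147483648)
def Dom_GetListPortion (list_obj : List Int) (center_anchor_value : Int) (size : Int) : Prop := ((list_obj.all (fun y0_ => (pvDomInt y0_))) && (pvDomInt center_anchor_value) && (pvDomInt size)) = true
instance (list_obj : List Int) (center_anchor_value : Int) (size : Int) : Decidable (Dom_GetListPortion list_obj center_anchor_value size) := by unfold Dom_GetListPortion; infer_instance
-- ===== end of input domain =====

-- B computes the clamped window directly and slides it in one closed-form step instead of
-- A's step-by-step grow/shrink loop; return values proved equal on Pre_ (simpler, not faster).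

-- ===== PORT A =====
-- inner 'for _ in range(0, dif)' loop of the 'target_index < index_dif' branch
def pvInnerL (n : Int) : Nat → Int → Int → Int × Int
  | 0, s, e => (s, e)
  | k+1, s, e =>
      if s - 1 ≥ 0 then pvInnerL n k (s - 1) e
      else if e + 1 ≤ n then pvInnerL n k s (e + 1)
      else pvInnerL n k s e

-- inner 'for _ in range(0, dif)' loop of the else branch
def pvInnerR (n : Int) : Nat → Int → Int → Int × Int
  | 0, s, e => (s, e)
  | k+1, s, e =>
      if e + 1 ≤ n then pvInnerR n k s (e + 1)
      else if s - 1 ≥ 0 then pvInnerR n k (s - 1) e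
      else pvInnerR n k s e

-- outer 'for _ in range(0, size)' loop; fuel = number of remaining iterations
def pvALoop (list_obj : List Int) (cav size index_dif : Int) :
    Nat → Int → Int → List Int → List Int
  | 0, _, _, portion => portion
  | k+1, s, e, portion =>
      let dif := size - (portion.length : Int)
      if dif = 0 then portion
      else
        match PySem.List.index? portion cav with
        | none => portion   -- portion.index raises ValueError (unreachable under Pre_)
        | some t =>
          let se :=
            if (t : Int) < index_dif then pvInnerL (list_obj.length : Int) dif.toNat s e
            else pvInnerR (list_obj.length : Int) dif.toNat s e
          pvALoop list_obj cav size index_dif k se.1 se.2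
            (PySem.List.slice list_obj (some se.1) (some se.2))

def GetListPortion (list_obj : List Int) (center_anchor_value : Int) (size : Int) : List Int :=
  if size ≥ (list_obj.length : Int) then list_obj
  else
    let index_dif := PySem.Int.floordiv size 2  -- floor(size / 2): exact on |size| ≤ 2^31
    match PySem.List.index? list_obj center_anchor_value with
    | none => []   -- list_obj.index raises ValueError: excluded by Pre_
    | some ci =>
      let center_anchor_index : Int := ci
      let start_index := center_anchor_index - index_dif
      let end_index := center_anchor_index + (index_dif + 1)
      let start_index := if start_index < 0 then 0 else start_index
      let end_index :=
        if end_index > (list_obj.length : Int) then (list_obj.length : Int) else end_index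
      let portion := PySem.List.slice list_obj (some start_index) (some end_index)
      pvALoop list_obj center_anchor_value size index_dif size.toNat start_index end_index portion

-- ===== PORT B =====
def GetListPortion_alt (list_obj : List Int) (center_anchor_value : Int) (size : Int) : List Int :=
  let n : Int := list_obj.length
  if size ≥ n then list_obj
  else
    let half := PySem.Int.floordiv size 2
    match PySem.List.index? list_obj center_anchor_value with
    | none => []   -- list_obj.index raises ValueError: excluded by Pre_
    | some ci =>
      let center : Int := ci
      let start := max 0 (center - half)
      let stop := min n (center + half + 1)
      let se :=
        if stop - start < size then (if start = 0 then (start, size) else (n - size, stop))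
        else (start, stop)
      PySem.List.slice list_obj (some se.1) (some se.2)

-- ===== PRECONDITION & SPEC =====
-- Excluded: exactly the inputs where A raises ValueError (center value absent while size < len);
-- B raises there too.
def Pre_GetListPortion (list_obj : List Int) (center_anchor_value : Int) (size : Int) : Prop :=
  size ≥ (list_obj.length : Int) ∨ center_anchor_value ∈ list_obj
instance (list_obj : List Int) (center_anchor_value : Int) (size : Int) : Decidable (Pre_GetListPortion list_obj center_anchor_value size) := by unfold Pre_GetListPortion; infer_instance
def pvWitness_GetListPortion : List Int × Int × Int := ([1, 2, 3, 4, 5], 4, 3)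

def Spec_GetListPortion (list_obj : List Int) (center_anchor_value : Int) (size : Int) (out : List Int) : Prop := out = GetListPortion_alt list_obj center_anchor_value size
instance (list_obj : List Int) (center_anchor_value : Int) (size : Int) (out : List Int) : Decidable (Spec_GetListPortion list_obj center_anchor_value size out) := by unfold Spec_GetListPortion; infer_instance

-- ===== CLAIM (what is proved, stated in full; the proofs are below) =====
def Claim_equal_GetListPortion : Prop := ∀ (list_obj : List Int) (center_anchor_value : Int) (size : Int), Dom_GetListPortion list_obj center_anchor_value size → Pre_GetListPortion list_obj center_anchor_value size → Spec_GetListPortion list_obj center_anchor_value size (GetListPortion list_obj center_anchor_value size)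


-- ===== LEMMAS AND PROOFS =====

-- converse of getElem_of_index?_eq_some: first occurrence determines index?
theorem pv_index?_of_first {xs : List Int} {v : Int} {k : Nat} (hk : k < xs.length)
    (hv : xs[k] = v) (hj : ∀ j (h : j < k), xs[j] ≠ v) :
    PySem.List.index? xs v = some k := by
  induction xs generalizing k with
  | nil => simp at hk
  | cons x xs ih =>
    cases k with
    | zero =>
      have hx : x = v := by simpa using hv
      subst hx; exact PySem.List.index?_cons_self x xs
    | succ k =>
      have hx : x ≠ v := by simpa using hj 0 (Nat.succ_pos k)
      rw [PySem.List.index?_cons_of_ne _ hx,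
        ih (k := k) (by simpa using hk) (by simpa using hv)
          (fun j hjk => by simpa using hj (j + 1) (by omega))]
      rfl

theorem pv_length_slice {l : List Int} {s e : Int} (hs : 0 ≤ s) (hse : s ≤ e)
    (hen : e ≤ (l.length : Int)) :
    (((PySem.List.slice l (some s) (some e)).length : Int)) = e - s := by
  rw [PySem.List.slice_toNat l hs (by omega)]
  simp only [List.length_take, List.length_drop]
  omega

theorem pv_index?_slice {l : List Int} {cav : Int} {c : Nat}
    (hidx : PySem.List.index? l cav = some c) {s e : Int}
    (hs : 0 ≤ s) (hsc : s ≤ (c : Int)) (hce : (c : Int) < e) (_hen : e ≤ (l.length : Int)) :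
    PySem.List.index? (PySem.List.slice l (some s) (some e)) cav = some (c - s.toNat) := by
  obtain ⟨hk, hvk, hfst⟩ := PySem.List.getElem_of_index?_eq_some hidx
  rw [PySem.List.slice_toNat l hs (by omega)]
  have hlen : (List.take (e.toNat - s.toNat) (List.drop s.toNat l)).length
      = min (e.toNat - s.toNat) (l.length - s.toNat) := by
    simp [List.length_take, List.length_drop]
  apply pv_index?_of_first (hk := by omega)
  · have h1 : c - s.toNat < e.toNat - s.toNat := by omega
    have h2 : s.toNat + (c - s.toNat) = c := by omega
    simp only [List.getElem_take, List.getElem_drop, h2]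
    exact hvk
  · intro j hjk
    have h3 : s.toNat + j < c := by omega
    simp only [List.getElem_take, List.getElem_drop]
    exact hfst (s.toNat + j) h3

theorem pvInnerL_zero (n : Int) (k : Nat) (e : Int) (he : e ≤ n) :
    pvInnerL n k 0 e = (0, min n (e + k)) := by
  induction k generalizing e with
  | zero => simp [pvInnerL]; omega
  | succ k ih =>
    rw [pvInnerL, if_neg (by omega : ¬ ((0 : Int) - 1 ≥ 0))]
    by_cases h2 : e + 1 ≤ n
    · rw [if_pos h2, ih _ (by omega)]
      have : e + 1 + (k : Int) = e + ((k : Nat) + 1 : Nat) := by push_cast; ring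
      rw [this]
    · rw [if_neg h2, ih _ he]
      have : min n (e + k) = min n (e + ((k : Nat) + 1 : Nat)) := by push_cast; omega
      rw [this]

theorem pvInnerR_end (n : Int) (k : Nat) (s : Int) (hs : 0 ≤ s) :
    pvInnerR n k s n = (max 0 (s - k), n) := by
  induction k generalizing s with
  | zero => simp [pvInnerR]; omega
  | succ k ih =>
    rw [pvInnerR, if_neg (by omega : ¬ (n + 1 ≤ n))]
    by_cases h2 : s - 1 ≥ 0
    · rw [if_pos h2, ih _ (by omega)]
      have : max 0 (s - 1 - (k : Int)) = max 0 (s - ((k : Nat) + 1 : Nat)) := by push_cast; omega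
      rw [this]
    · rw [if_neg h2, ih _ hs]
      have : max 0 (s - (k : Int)) = max 0 (s - ((k : Nat) + 1 : Nat)) := by push_cast; omega
      rw [this]

theorem pvALoop_done (l : List Int) (cav size id : Int) (k : Nat) (s e : Int)
    (portion : List Int) (h : size - (portion.length : Int) = 0) :
    pvALoop l cav size id k s e portion = portion := by
  cases k with
  | zero => rfl
  | succ k => rw [pvALoop]; simp [h]

theorem pvALoop_step (l : List Int) (cav size id : Int) (k : Nat) (s e : Int)
    (portion : List Int) (t : Nat)
    (hne : size - (portion.length : Int) ≠ 0)
    (hidx : PySem.List.index? portion cav = some t) :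
    pvALoop l cav size id (k + 1) s e portion =
      (let se := if (t : Int) < id
          then pvInnerL (l.length : Int) (size - (portion.length : Int)).toNat s e
          else pvInnerR (l.length : Int) (size - (portion.length : Int)).toNat s e
       pvALoop l cav size id k se.1 se.2 (PySem.List.slice l (some se.1) (some se.2))) := by
  rw [pvALoop]
  simp only [if_neg hne, hidx]

theorem pvALoop_stall (l : List Int) (cav size id : Int) (k : Nat) (s e : Int)
    (portion : List Int) (t : Nat)
    (hz : (size - (portion.length : Int)).toNat = 0)
    (hidx : PySem.List.index? portion cav = some t)
    (hsl : PySem.List.slice l (some s) (some e) = portion) :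
    pvALoop l cav size id k s e portion = portion := by
  induction k with
  | zero => rfl
  | succ k ih =>
    by_cases h0 : size - (portion.length : Int) = 0
    · exact pvALoop_done _ _ _ _ _ _ _ _ h0
    · rw [pvALoop_step _ _ _ _ _ _ _ _ t h0 hidx]
      by_cases ht : (t : Int) < id
      · simp only [if_pos ht, hz]
        show pvALoop l cav size id k (pvInnerL _ 0 s e).1 (pvInnerL _ 0 s e).2 _ = portion
        simp only [pvInnerL, hsl]
        exact ih
      · simp only [if_neg ht, hz]
        show pvALoop l cav size id k (pvInnerR _ 0 s e).1 (pvInnerR _ 0 s e).2 _ = portion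
        simp only [pvInnerR, hsl]
        exact ih

-- ===== VERDICT (by name: the statement is the Claim_ definition above) =====
theorem GetListPortion_spec : Claim_equal_GetListPortion := by
  intro l cav size hdom hpre
  unfold Spec_GetListPortion
  by_cases hsz : size ≥ (l.length : Int)
  · simp [GetListPortion, GetListPortion_alt, hsz]
  · have hmem : cav ∈ l := by
      rcases hpre with h | h
      · exact absurd h hsz
      · exact h
    obtain ⟨c, hidx⟩ : ∃ c, PySem.List.index? l cav = some c := by
      cases h : PySem.List.index? l cav with
      | none => exact absurd ((PySem.List.index?_eq_none_iff l cav).mp h) (not_not_intro hmem)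
      | some c => exact ⟨c, rfl⟩
    obtain ⟨hclen, hcv, hcfirst⟩ := PySem.List.getElem_of_index?_eq_some hidx
    simp only [GetListPortion, GetListPortion_alt, if_neg hsz, hidx]
    have hfd := (PySem.Int.floordiv_eq_iff_of_pos (a := size) (b := 2)
      (q := PySem.Int.floordiv size 2) (by norm_num)).mp rfl
    set fd := PySem.Int.floordiv size 2 with hfddef
    set n : Int := (l.length : Int) with hndef
    have hcn : (c : Int) < n := by rw [hndef]; exact_mod_cast hclen
    have hc0 : (0 : Int) ≤ (c : Int) := Int.natCast_nonneg c
    have hS : (if (c : Int) - fd < 0 then 0 else (c : Int) - fd) = max 0 ((c : Int) - fd) := by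
      split_ifs <;> omega
    have hE : (if (c : Int) + (fd + 1) > n then n else (c : Int) + (fd + 1))
        = min n ((c : Int) + fd + 1) := by
      split_ifs <;> omega
    rw [hS, hE]
    set s0 := max 0 ((c : Int) - fd) with hs0def
    set e0 := min n ((c : Int) + fd + 1) with he0def
    rcases le_or_gt size 0 with hsmall | hpos
    · have hz : size.toNat = 0 := by omega
      rw [hz, if_neg (show ¬ (e0 - s0 < size) by omega)]
      rfl
    · have hs00 : 0 ≤ s0 := by omega
      have hs0c : s0 ≤ (c : Int) := by omega
      have hce0 : (c : Int) < e0 := by omega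
      have he0n : e0 ≤ n := by omega
      have hplen : ((PySem.List.slice l (some s0) (some e0)).length : Int) = e0 - s0 :=
        pv_length_slice hs00 (by omega) (by omega)
      have hpidx := pv_index?_slice hidx hs00 hs0c hce0 (by omega)
      have htc : ((c - s0.toNat : Nat) : Int) = (c : Int) - s0 := by omega
      rcases lt_trichotomy (size - (e0 - s0)) 0 with hd | hd | hd
      · -- window already longer than size (even-size middle case): the loop never changes it
        rw [if_neg (show ¬ (e0 - s0 < size) by omega)]
        exact pvALoop_stall _ _ _ _ _ _ _ _ _ (by omega) hpidx rfl
      · -- window has exactly size elements: the loop breaks at once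
        rw [if_neg (show ¬ (e0 - s0 < size) by omega)]
        exact pvALoop_done _ _ _ _ _ _ _ _ (by omega)
      · -- shortfall: exactly one side was clipped
        rw [if_pos (show e0 - s0 < size by omega)]
        obtain ⟨m, hm⟩ : ∃ m, size.toNat = m + 1 := ⟨size.toNat - 1, by omega⟩
        rw [hm, pvALoop_step _ _ _ _ _ _ _ _ (c - s0.toNat) (by omega) hpidx]
        by_cases hlc : (c : Int) - fd < 0
        · -- clipped on the left: s0 = 0, window slides to [0, size)
          have hs0z : s0 = 0 := by omega
          have he0v : e0 = (c : Int) + fd + 1 := by omega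
          rw [if_pos (show s0 = 0 from hs0z)]
          rw [if_pos (show ((c - s0.toNat : Nat) : Int) < fd by omega)]
          simp only [hplen]
          rw [hs0z, pvInnerL_zero n _ e0 (by omega)]
          have hmin : min n (e0 + ((size - (e0 - 0)).toNat : Int)) = size := by omega
          rw [hmin]
          show pvALoop l cav size fd m 0 size (PySem.List.slice l (some 0) (some size))
            = PySem.List.slice l (some 0) (some size)
          exact pvALoop_done _ _ _ _ _ _ _ _
            (by rw [pv_length_slice (by omega) (by omega) (by omega)]; omega)
        · -- clipped on the right: e0 = n, window slides to [n - size, n)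
          have hs0v : s0 = (c : Int) - fd := by omega
          have he0v : e0 = n := by omega
          rw [if_neg (show ¬ s0 = 0 by omega)]
          rw [if_neg (show ¬ ((c - s0.toNat : Nat) : Int) < fd by omega)]
          simp only [hplen]
          rw [he0v, pvInnerR_end n _ s0 hs00]
          have hmax : max 0 (s0 - ((size - (n - s0)).toNat : Int)) = n - size := by omega
          rw [hmax]
          show pvALoop l cav size fd m (n - size) n (PySem.List.slice l (some (n - size)) (some n))
            = PySem.List.slice l (some (n - size)) (some n)
          exact pvALoop_done _ _ _ _ _ _ _ _
            (by rw [pv_length_slice (by omega) (by omega) (by omega)]; omega)
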